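-- pv_equiv track=rewrite | github.com/daem-uni/dagdim-lab-informatica | lab7/e7.py | sumWithoutSmallest
-- ===== SOURCE A (Python) =====
-- def sumWithoutSmallest(array):
--     min_num = array[0]
--     running_sum = 0
--
--     for e in array:
--         running_sum += e
--
--         if e < min_num:
--             min_num = e
--
--     return running_sum - min_num
-- ===== SOURCE B (Python) =====
-- def sumWithoutSmallest(array):
--     return sum(array) - sorted(array)[0]
-- ===== Notes on version B (the rewrite author's own statement) =====
-- stated objective: simpler
-- what changed: Replaces A's single fused scan (running sum plus running minimum tracked in a loop) with two builtin passes: sum(array) minus the head of sorted(array).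
import Mathlib
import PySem

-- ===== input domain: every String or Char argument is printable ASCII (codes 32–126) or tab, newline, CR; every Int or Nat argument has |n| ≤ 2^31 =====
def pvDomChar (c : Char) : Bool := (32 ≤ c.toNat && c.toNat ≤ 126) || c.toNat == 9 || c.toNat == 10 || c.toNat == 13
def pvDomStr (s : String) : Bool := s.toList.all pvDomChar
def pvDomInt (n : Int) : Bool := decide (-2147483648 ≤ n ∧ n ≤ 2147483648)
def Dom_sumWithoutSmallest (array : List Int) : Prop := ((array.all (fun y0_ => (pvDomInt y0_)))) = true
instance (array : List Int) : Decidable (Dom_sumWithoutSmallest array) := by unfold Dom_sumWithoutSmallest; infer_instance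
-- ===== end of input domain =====

-- B replaces A's fused running-sum/running-min loop with sum(array) - sorted(array)[0]; objective: simpler.

-- ===== PORT A =====
-- min_num = array[0]; then one loop accumulating running_sum and updating min_num.
def sumWithoutSmallest (array : List Int) : Int :=
  match array with
  | [] => 0  -- array[0] raises IndexError; excluded by Pre_
  | h :: _ =>
    let st := array.foldl
      (fun (p : Int × Int) e => (if e < p.1 then e else p.1, p.2 + e)) (h, 0)
    st.2 - st.1

-- ===== PORT B =====
def sumWithoutSmallest_alt (array : List Int) : Int :=
  match PySem.List.sorted array (fun x => x) false with
  | [] => 0  -- sorted(array)[0] raises IndexError; excluded by Pre_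
  | m :: _ => array.sum - m

-- ===== PRECONDITION & SPEC =====
-- Pre_ excludes exactly the empty list, where both A and B raise IndexError.
def Pre_sumWithoutSmallest (array : List Int) : Prop := array ≠ []
instance (array : List Int) : Decidable (Pre_sumWithoutSmallest array) := by
  unfold Pre_sumWithoutSmallest; infer_instance

def pvWitness_sumWithoutSmallest : List Int := [3, -1, 4]

def Spec_sumWithoutSmallest (array : List Int) (out : Int) : Prop := out = sumWithoutSmallest_alt array
instance (array : List Int) (out : Int) : Decidable (Spec_sumWithoutSmallest array out) := by unfold Spec_sumWithoutSmallest; infer_instance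

-- ===== CLAIM (what is proved, stated in full; the proofs are below) =====
def Claim_equal_sumWithoutSmallest : Prop := ∀ (array : List Int), Dom_sumWithoutSmallest array → Pre_sumWithoutSmallest array → Spec_sumWithoutSmallest array (sumWithoutSmallest array)

-- ===== LEMMAS AND PROOFS =====

-- Second component of A's fold state is the running sum.
theorem foldA_snd (l : List Int) (p : Int × Int) :
    (l.foldl (fun (p : Int × Int) e => (if e < p.1 then e else p.1, p.2 + e)) p).2
      = p.2 + l.sum := by
  induction l generalizing p with
  | nil => simp
  | cons x t ih => simp [ih]; ring

-- First component of A's fold state is a running minimum.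
theorem foldA_fst (l : List Int) (p : Int × Int) :
    (l.foldl (fun (p : Int × Int) e => (if e < p.1 then e else p.1, p.2 + e)) p).1
      = l.foldl min p.1 := by
  induction l generalizing p with
  | nil => rfl
  | cons x t ih =>
    simp only [List.foldl_cons, ih]
    congr 1
    rcases lt_or_ge x p.1 with h | h
    · simp [h, le_of_lt h]
    · simp [h, not_lt.mpr h]

theorem foldl_min_mem (l : List Int) (a : Int) : l.foldl min a ∈ a :: l := by
  induction l generalizing a with
  | nil => simp
  | cons x t ih =>
    simp only [List.foldl_cons, List.mem_cons]
    rcases List.mem_cons.mp (ih (min a x)) with h | h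
    · rw [h]
      rcases le_total a x with h' | h'
      · exact Or.inl (min_eq_left h')
      · exact Or.inr (Or.inl (min_eq_right h'))
    · exact Or.inr (Or.inr h)

theorem foldl_min_le (l : List Int) (a : Int) : ∀ x ∈ a :: l, l.foldl min a ≤ x := by
  induction l generalizing a with
  | nil => simp
  | cons y t ih =>
    intro x hx
    rw [List.foldl_cons]
    rcases List.mem_cons.mp hx with h | hx2
    · rw [h]; exact le_trans (ih (min a y) (min a y) (List.mem_cons_self ..)) (min_le_left _ _)
    · rcases List.mem_cons.mp hx2 with h | h
      · rw [h]; exact le_trans (ih (min a y) (min a y) (List.mem_cons_self ..)) (min_le_right _ _)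
      · exact ih (min a y) x (by simp [h])

-- ===== VERDICT (by name: the statement is the Claim_ definition above) =====
theorem sumWithoutSmallest_spec : Claim_equal_sumWithoutSmallest := by
  intro array _ hpre
  unfold Spec_sumWithoutSmallest sumWithoutSmallest sumWithoutSmallest_alt
  match harr : array with
  | [] => exact absurd rfl hpre
  | h :: t =>
    simp only
    rcases hs : PySem.List.sorted (h :: t) (fun x => x) false with _ | ⟨m, ts⟩
    · have hp := PySem.List.sorted_perm (h :: t) (fun x => x) false
      rw [hs] at hp
      have := hp.length_eq
      simp at this
    · rw [foldA_snd, foldA_fst]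
      have hmem : m ∈ h :: t := by
        have := PySem.List.mem_sorted (xs := h :: t) (key := fun x => x) (rev := false) (x := m)
        rw [hs] at this
        exact this.mp (by simp)
      have hmle : ∀ y ∈ h :: t, m ≤ y :=
        PySem.List.key_head_sorted_le (xs := h :: t) (key := fun x => x) hs
      have h1 : (h :: t).foldl min h ≤ m := foldl_min_le (h :: t) h m (by simp [hmem])
      have h2 : m ≤ (h :: t).foldl min h := by
        rcases List.mem_cons.mp (foldl_min_mem (h :: t) h) with hm | hm
        · rw [hm]; exact hmle h (by simp)
        · exact hmle _ (by simpa using hm)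
      rw [le_antisymm h1 h2]
      simp
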